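-- pv_equiv track=rewrite | github.com/allenwest24/Advent-of-Code | 2023/Day 03/part2.py | total_adjacent_nums
-- ===== SOURCE A (Python) =====
-- def total_adjacent_nums(lol, ii, jj):
--     num_locations = {}
--     out = 0
--     # Define the range for checking adjacent cells.
--     row_range = range(max(0, ii - 1), min(ii + 2, len(lol)))
--     col_range = range(max(0, jj - 1), min(jj + 2, len(lol[0])))
--
--     for i in row_range:
--         running_num = False
--         for j in col_range:
--             # Skip the cell itself.
--             if i == ii and j == jj:
--                 running_num = False
--                 continue
--
--             if lol[i][j].isdigit():
--                 if not running_num: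
--                     num_locations[out] = (i, j)
--                     out += 1
--                 running_num = True
--             else:
--                 running_num = False
--
--     return out, num_locations
-- ===== SOURCE B (Python) =====
-- def total_adjacent_nums(lol, ii, jj):
--     # Set-based: collect the digit cells of the window into a set, then a number
--     # start is exactly a digit cell whose left neighbour is not a digit cell of
--     # the window -- a local membership test, no running state.
--     rows = range(max(0, ii - 1), min(ii + 2, len(lol)))
--     cols = range(max(0, jj - 1), min(jj + 2, len(lol[0])))
--     digits = {(i, j) for i in rows for j in cols
--               if (i, j) != (ii, jj) and lol[i][j].isdigit()}
--     starts = [(i, j) for i in rows for j in cols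
--               if (i, j) in digits and (i, j - 1) not in digits]
--     return len(starts), dict(enumerate(starts))
-- ===== Notes on version B (the rewrite author's own statement) =====
-- stated objective: alternative
-- what changed: A threads a running_num state machine with a shared counter through nested row/column scans, appending to the dict as it goes; B first materialises the window's digit cells as a set, then characterises a number start by a purely local membership test ((i,j) in the set and (i,j-1) not in it) with no sequential state, and numbers the collected starts at the end with dict(enumerate(...)).
import Mathlib
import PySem

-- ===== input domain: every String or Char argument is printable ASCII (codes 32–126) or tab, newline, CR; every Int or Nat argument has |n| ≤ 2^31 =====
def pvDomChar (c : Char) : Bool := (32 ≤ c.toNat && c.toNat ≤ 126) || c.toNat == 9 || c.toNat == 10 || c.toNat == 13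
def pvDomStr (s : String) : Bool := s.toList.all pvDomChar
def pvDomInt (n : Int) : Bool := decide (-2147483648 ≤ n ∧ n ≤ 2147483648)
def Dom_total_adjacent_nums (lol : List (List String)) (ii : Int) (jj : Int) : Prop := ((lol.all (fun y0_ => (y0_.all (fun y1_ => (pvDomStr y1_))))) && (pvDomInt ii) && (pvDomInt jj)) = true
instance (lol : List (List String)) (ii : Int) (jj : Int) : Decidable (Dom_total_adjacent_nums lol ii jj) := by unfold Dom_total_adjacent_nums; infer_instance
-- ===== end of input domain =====

-- B replaces A's threaded running_num state machine by a two-phase set-based pass: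
-- collect the window's digit cells into a set, then a number start is a digit cell
-- whose left neighbour is not in the set (alternative decomposition, same cost).

-- ===== PORT A =====
-- inner-loop body of A, literal: the state is (num_locations as a list, out, running_num)
def aInner (lol : List (List String)) (ii jj i : Int)
    (s : List (Int × Int × Int) × Int × Bool) (j : Int) : List (Int × Int × Int) × Int × Bool :=
  if i == ii && j == jj then (s.1, s.2.1, false)
  else if PySem.Str.strIsdigit (PySem.List.pyGetD (PySem.List.pyGetD lol i []) j "") then
    if !s.2.2 then (s.1 ++ [(s.2.1, i, j)], s.2.1 + 1, true)
    else (s.1, s.2.1, true)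
  else (s.1, s.2.1, false)

def total_adjacent_nums (lol : List (List String)) (ii : Int) (jj : Int) : Int × (List (Int × Int × Int)) :=
  let rowRange := PySem.List.pyRange (max 0 (ii - 1)) (min (ii + 2) (lol.length : Int)) 1
  let colRange := PySem.List.pyRange (max 0 (jj - 1)) (min (jj + 2) ((PySem.List.pyGetD lol 0 []).length : Int)) 1
  let st := rowRange.foldl
    (fun (st : List (Int × Int × Int) × Int) i =>
      let inner := colRange.foldl (aInner lol ii jj i) (st.1, st.2, false)
      (inner.1, inner.2.1))
    ([], 0)
  (st.2, st.1)

-- ===== PORT B =====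
-- the set of digit cells of the window (Python: the set comprehension 'digits')
def bDigits (lol : List (List String)) (ii jj : Int) (rows cols : List Int) : PySem.Set (Int × Int) :=
  PySem.Set.ofList (rows.flatMap (fun i => cols.filterMap (fun j =>
    if !(i == ii && j == jj) && PySem.Str.strIsdigit (PySem.List.pyGetD (PySem.List.pyGetD lol i []) j "")
    then some (i, j) else none)))

def total_adjacent_nums_alt (lol : List (List String)) (ii : Int) (jj : Int) : Int × (List (Int × Int × Int)) :=
  let rows := PySem.List.pyRange (max 0 (ii - 1)) (min (ii + 2) (lol.length : Int)) 1
  let cols := PySem.List.pyRange (max 0 (jj - 1)) (min (jj + 2) ((PySem.List.pyGetD lol 0 []).length : Int)) 1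
  let digits := bDigits lol ii jj rows cols
  let starts := rows.flatMap (fun i => cols.filterMap (fun j =>
    if PySem.Set.contains digits (i, j) && !PySem.Set.contains digits (i, j - 1)
    then some (i, j) else none))
  ((starts.length : Int), PySem.List.enumerate starts 0)

-- ===== PRECONDITION & SPEC =====
-- Pre_ excludes exactly the inputs where A raises IndexError: the empty grid (lol[0]) and
-- ragged grids where some window cell other than the skipped centre lies beyond its row's length.
def Pre_total_adjacent_nums (lol : List (List String)) (ii : Int) (jj : Int) : Prop :=
  lol ≠ [] ∧
  ∀ i ∈ PySem.List.pyRange (max 0 (ii - 1)) (min (ii + 2) (lol.length : Int)) 1,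
    ∀ j ∈ PySem.List.pyRange (max 0 (jj - 1)) (min (jj + 2) ((PySem.List.pyGetD lol 0 []).length : Int)) 1,
      (i = ii ∧ j = jj) ∨ j < ((PySem.List.pyGetD lol i []).length : Int)
instance (lol : List (List String)) (ii : Int) (jj : Int) : Decidable (Pre_total_adjacent_nums lol ii jj) := by
  unfold Pre_total_adjacent_nums; infer_instance

def pvWitness_total_adjacent_nums : List (List String) × Int × Int := ([[".", "1"], ["2", "."]], 0, 0)

def Spec_total_adjacent_nums (lol : List (List String)) (ii : Int) (jj : Int) (out : Int × (List (Int × Int × Int))) : Prop := out = total_adjacent_nums_alt lol ii jj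
instance (lol : List (List String)) (ii : Int) (jj : Int) (out : Int × (List (Int × Int × Int))) : Decidable (Spec_total_adjacent_nums lol ii jj out) := by unfold Spec_total_adjacent_nums; infer_instance

-- ===== CLAIM (what is proved, stated in full; the proofs are below) =====
def Claim_equal_total_adjacent_nums : Prop := ∀ (lol : List (List String)) (ii : Int) (jj : Int), Dom_total_adjacent_nums lol ii jj → Pre_total_adjacent_nums lol ii jj → Spec_total_adjacent_nums lol ii jj (total_adjacent_nums lol ii jj)

-- ===== LEMMAS AND PROOFS =====

-- the effective per-cell digit mask (false at the skipped centre)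
def pvM (lol : List (List String)) (ii jj i j : Int) : Bool :=
  !(i == ii && j == jj) && PySem.Str.strIsdigit (PySem.List.pyGetD (PySem.List.pyGetD lol i []) j "")

-- run starts of one row, threaded by the previous mask value (A's running_num)
def pvRun (lol : List (List String)) (ii jj i : Int) : List Int → Bool → List (Int × Int)
  | [], _ => []
  | j :: t, prev =>
    if pvM lol ii jj i j && !prev then (i, j) :: pvRun lol ii jj i t (pvM lol ii jj i j)
    else pvRun lol ii jj i t (pvM lol ii jj i j)

theorem aInner_foldl (lol : List (List String)) (ii jj i : Int) :
    ∀ (js : List Int) (prev : Bool) (nl : List (Int × Int × Int)) (out : Int),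
      js.foldl (aInner lol ii jj i) (nl, out, prev)
        = (nl ++ PySem.List.enumerate (pvRun lol ii jj i js prev) out,
           out + (pvRun lol ii jj i js prev).length,
           js.foldl (fun _ j => pvM lol ii jj i j) prev) := by
  intro js
  induction js with
  | nil => intro prev nl out; simp [pvRun, PySem.List.enumerate_nil]
  | cons j t ih =>
    intro prev nl out
    simp only [List.foldl_cons]
    cases hC : (i == ii && j == jj) with
    | true =>
      have hm : pvM lol ii jj i j = false := by simp [pvM, hC]
      have ha : aInner lol ii jj i (nl, out, prev) j = (nl, out, false) := by
        simp [aInner, hC]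
      rw [ha, ih]
      simp [pvRun, hm]
    | false =>
      cases hD : PySem.Chars.strIsdigit (PySem.List.pyGetD (PySem.List.pyGetD lol i []) j "").toList with
      | true =>
        have hm : pvM lol ii jj i j = true := by simp [pvM, hC, hD]
        cases prev with
        | false =>
          have ha : aInner lol ii jj i (nl, out, false) j = (nl ++ [(out, i, j)], out + 1, true) := by
            simp [aInner, hC, hD]
          rw [ha, ih]
          simp only [pvRun, hm, Bool.not_false, Bool.and_true]
          refine Prod.ext ?_ (Prod.ext ?_ rfl)
          · simp [PySem.List.enumerate_cons]
          · show out + 1 + ((pvRun lol ii jj i t true).length : Int)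
              = out + (((pvRun lol ii jj i t true).length + 1 : Nat) : Int)
            push_cast
            ring
        | true =>
          have ha : aInner lol ii jj i (nl, out, true) j = (nl, out, true) := by
            simp [aInner, hC, hD]
          rw [ha, ih]
          simp [pvRun, hm]
      | false =>
        have hm : pvM lol ii jj i j = false := by simp [pvM, hD]
        have ha : aInner lol ii jj i (nl, out, prev) j = (nl, out, false) := by
          simp [aInner, hC, hD]
        rw [ha, ih]
        simp [pvRun, hm]

-- A's outer fold produces the enumerated concatenation of the per-row run lists
theorem outer_foldl (lol : List (List String)) (ii jj : Int) (cols : List Int) :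
    ∀ (rows : List Int) (S : List (Int × Int)),
      rows.foldl
        (fun (st : List (Int × Int × Int) × Int) i =>
          ((cols.foldl (aInner lol ii jj i) (st.1, st.2, false)).1,
           (cols.foldl (aInner lol ii jj i) (st.1, st.2, false)).2.1))
        (PySem.List.enumerate S 0, (S.length : Int))
      = (PySem.List.enumerate (S ++ rows.flatMap (fun i => pvRun lol ii jj i cols false)) 0,
         ((S ++ rows.flatMap (fun i => pvRun lol ii jj i cols false)).length : Int)) := by
  intro rows
  induction rows with
  | nil => intro S; simp
  | cons i t ih =>
    intro S
    simp only [List.foldl_cons]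
    rw [aInner_foldl]
    have h1 : PySem.List.enumerate S 0 ++ PySem.List.enumerate (pvRun lol ii jj i cols false) ((S.length : Int))
        = PySem.List.enumerate (S ++ pvRun lol ii jj i cols false) 0 := by
      rw [PySem.List.enumerate_append]
      norm_num
    have h2 : ((S.length : Int) + ((pvRun lol ii jj i cols false).length : Int))
        = (((S ++ pvRun lol ii jj i cols false).length : Int)) := by
      push_cast [List.length_append]
      ring
    rw [h1, h2, ih]
    simp [List.flatMap_cons, List.append_assoc]

-- membership in B's digit set, characterised cell-wise
theorem pvM_eq (lol : List (List String)) (ii jj i j : Int) :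
    (!(i == ii && j == jj) && PySem.Str.strIsdigit (PySem.List.pyGetD (PySem.List.pyGetD lol i []) j ""))
      = pvM lol ii jj i j := rfl

theorem contains_bDigits (lol : List (List String)) (ii jj : Int) (rows cols : List Int) (i j : Int) :
    PySem.Set.contains (bDigits lol ii jj rows cols) (i, j)
      = (decide (i ∈ rows) && decide (j ∈ cols) && pvM lol ii jj i j) := by
  have key : PySem.Set.contains (bDigits lol ii jj rows cols) (i, j) = true
      ↔ (decide (i ∈ rows) && decide (j ∈ cols) && pvM lol ii jj i j) = true := by
    rw [PySem.Set.contains_iff]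
    unfold bDigits
    rw [PySem.Set.mem_ofList]
    simp only [List.mem_flatMap, List.mem_filterMap]
    constructor
    · rintro ⟨i', hi', j', hj', h⟩
      split at h
      · rename_i hc
        obtain ⟨h1, h2⟩ := Prod.mk.injEq .. ▸ (Option.some.injEq .. ▸ h)
        subst h1; subst h2
        simp only [Bool.and_eq_true, decide_eq_true_eq]
        exact ⟨⟨hi', hj'⟩, pvM_eq lol ii jj i' j' ▸ hc⟩
      · exact absurd h (by simp)
    · intro h
      simp only [Bool.and_eq_true, decide_eq_true_eq] at h
      obtain ⟨⟨hi, hj⟩, hc⟩ := h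
      refine ⟨i, hi, j, hj, ?_⟩
      rw [pvM_eq lol ii jj i j, hc]
      rfl
  cases hL : PySem.Set.contains (bDigits lol ii jj rows cols) (i, j) <;>
    cases hR : (decide (i ∈ rows) && decide (j ∈ cols) && pvM lol ii jj i j) <;>
      simp_all

-- one row of B equals A's run-start list: fuel induction over the consecutive column range
theorem bRow_eq_pvRun (lol : List (List String)) (ii jj : Int) (a0 b0 : Int) (rows : List Int)
    (i : Int) (hi : i ∈ rows) :
    ∀ (n : Nat) (a : Int), (b0 - a).toNat = n → a0 ≤ a →
      (PySem.List.pyRange a b0 1).filterMap (fun j =>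
          if PySem.Set.contains (bDigits lol ii jj rows (PySem.List.pyRange a0 b0 1)) (i, j)
              && !PySem.Set.contains (bDigits lol ii jj rows (PySem.List.pyRange a0 b0 1)) (i, j - 1)
          then some (i, j) else none)
        = pvRun lol ii jj i (PySem.List.pyRange a b0 1)
            (decide (a0 < a) && pvM lol ii jj i (a - 1)) := by
  intro n
  induction n with
  | zero =>
    intro a hn ha
    have hab : b0 ≤ a := by omega
    rw [PySem.List.pyRange_one_eq_nil hab]
    simp [pvRun]
  | succ m ih =>
    intro a hn ha
    have hab : a < b0 := by omega
    rw [PySem.List.pyRange_one_cons hab]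
    have hcur : PySem.Set.contains (bDigits lol ii jj rows (PySem.List.pyRange a0 b0 1)) (i, a)
        = pvM lol ii jj i a := by
      rw [contains_bDigits]
      simp [hi, PySem.List.mem_pyRange_one, ha, hab]
    have hprev : PySem.Set.contains (bDigits lol ii jj rows (PySem.List.pyRange a0 b0 1)) (i, a - 1)
        = (decide (a0 < a) && pvM lol ii jj i (a - 1)) := by
      rw [contains_bDigits]
      have h1 : (a - 1 ∈ PySem.List.pyRange a0 b0 1) ↔ a0 < a := by
        rw [PySem.List.mem_pyRange_one]; omega
      simp [hi, h1]
    have hrec := ih (a + 1) (by omega) (by omega)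
    have hp1 : (decide (a0 < a + 1) && pvM lol ii jj i (a + 1 - 1)) = pvM lol ii jj i a := by
      have : a0 < a + 1 := by omega
      simp [this]
    rw [hp1] at hrec
    simp only [List.filterMap_cons, pvRun, hcur, hprev]
    cases hM : pvM lol ii jj i a with
    | true =>
      rw [hM] at hrec
      cases hP : (decide (a0 < a) && pvM lol ii jj i (a - 1)) with
      | true =>
        simp only [Bool.not_true, Bool.and_false]
        exact hrec
      | false =>
        simp only [Bool.not_false, Bool.and_true, reduceIte]
        exact congrArg (List.cons (i, a)) hrec
    | false =>
      rw [hM] at hrec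
      simp only [Bool.false_and]
      exact hrec

-- ===== VERDICT (by name: the statement is the Claim_ definition above) =====
theorem total_adjacent_nums_spec : Claim_equal_total_adjacent_nums := by
  intro lol ii jj _ _
  show total_adjacent_nums lol ii jj = total_adjacent_nums_alt lol ii jj
  simp only [total_adjacent_nums, total_adjacent_nums_alt]
  have hA := outer_foldl lol ii jj
    (PySem.List.pyRange (max 0 (jj - 1)) (min (jj + 2) ((PySem.List.pyGetD lol 0 []).length : Int)) 1)
    (PySem.List.pyRange (max 0 (ii - 1)) (min (ii + 2) (lol.length : Int)) 1) []
  simp only [PySem.List.enumerate_nil, List.length_nil, Nat.cast_zero, List.nil_append] at hA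
  rw [hA]
  have hB : (PySem.List.pyRange (max 0 (ii - 1)) (min (ii + 2) (lol.length : Int)) 1).flatMap
        (fun i => (PySem.List.pyRange (max 0 (jj - 1)) (min (jj + 2) ((PySem.List.pyGetD lol 0 []).length : Int)) 1).filterMap (fun j =>
          if PySem.Set.contains (bDigits lol ii jj
                (PySem.List.pyRange (max 0 (ii - 1)) (min (ii + 2) (lol.length : Int)) 1)
                (PySem.List.pyRange (max 0 (jj - 1)) (min (jj + 2) ((PySem.List.pyGetD lol 0 []).length : Int)) 1)) (i, j)
              && !PySem.Set.contains (bDigits lol ii jj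
                (PySem.List.pyRange (max 0 (ii - 1)) (min (ii + 2) (lol.length : Int)) 1)
                (PySem.List.pyRange (max 0 (jj - 1)) (min (jj + 2) ((PySem.List.pyGetD lol 0 []).length : Int)) 1)) (i, j - 1)
          then some (i, j) else none))
      = (PySem.List.pyRange (max 0 (ii - 1)) (min (ii + 2) (lol.length : Int)) 1).flatMap
        (fun i => pvRun lol ii jj i
          (PySem.List.pyRange (max 0 (jj - 1)) (min (jj + 2) ((PySem.List.pyGetD lol 0 []).length : Int)) 1) false) := by
    apply List.flatMap_congr
    intro i hi
    have h := bRow_eq_pvRun lol ii jj (max 0 (jj - 1)) (min (jj + 2) ((PySem.List.pyGetD lol 0 []).length : Int))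
      (PySem.List.pyRange (max 0 (ii - 1)) (min (ii + 2) (lol.length : Int)) 1) i hi
      ((min (jj + 2) ((PySem.List.pyGetD lol 0 []).length : Int)) - (max 0 (jj - 1))).toNat
      (max 0 (jj - 1)) rfl le_rfl
    have hz : (decide ((max 0 (jj - 1)) < (max 0 (jj - 1))) && pvM lol ii jj i ((max 0 (jj - 1)) - 1)) = false := by
      simp
    rw [hz] at h
    exact h
  rw [hB]
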